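-- pv_equiv track=rewrite | github.com/archiportal/Mixed-assignment | Q7.py | Calculate_Bill
-- ===== SOURCE A (Python) =====
-- def Calculate_Bill(StoreList,Customer_List):
--     total = 0
--     for item in Customer_List:
--         if item in StoreList:
--             cost = StoreList[item] * Customer_List[item]
--             total += cost
--         else:
--             return -1
--     return total
-- ===== SOURCE B (Python) =====
-- def Calculate_Bill(StoreList, Customer_List):
--     # Scan the STORE instead of the customer: keep a shrinking set of
--     # still-unmatched customer keys, accumulate price*quantity per match,
--     # and report -1 iff some customer key was never matched.
--     needed = set(Customer_List)
--     total = 0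
--     for item, price in StoreList.items():
--         if item in needed:
--             total += price * Customer_List[item]
--             needed.discard(item)
--     return -1 if needed else total
-- ===== Notes on version B (the rewrite author's own statement) =====
-- stated objective: alternative
-- what changed: B inverts the traversal: instead of walking the customer dict and probing the store, it walks the store items once while maintaining a shrinking set of still-unmatched customer keys, summing matched price*quantity and returning -1 iff the set is nonempty at the end.
import Mathlib
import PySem

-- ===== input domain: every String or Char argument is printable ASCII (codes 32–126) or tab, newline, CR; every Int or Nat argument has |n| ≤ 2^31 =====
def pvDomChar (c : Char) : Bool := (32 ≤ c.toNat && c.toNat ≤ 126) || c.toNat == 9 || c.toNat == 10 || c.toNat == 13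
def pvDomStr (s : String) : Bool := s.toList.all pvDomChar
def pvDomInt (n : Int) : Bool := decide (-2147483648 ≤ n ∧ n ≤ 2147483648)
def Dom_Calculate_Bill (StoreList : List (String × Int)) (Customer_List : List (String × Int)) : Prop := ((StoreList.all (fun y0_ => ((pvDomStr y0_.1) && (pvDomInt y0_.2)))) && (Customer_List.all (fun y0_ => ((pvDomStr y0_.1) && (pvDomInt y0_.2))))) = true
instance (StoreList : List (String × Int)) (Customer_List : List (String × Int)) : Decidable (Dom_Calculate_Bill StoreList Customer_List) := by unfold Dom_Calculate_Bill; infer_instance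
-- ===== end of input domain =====

-- B inverts the traversal: it scans the STORE items once, maintaining a shrinking set of
-- still-unmatched customer keys, instead of A's customer-keyed loop probing the store (objective: alternative).

-- ===== PORT A =====
-- A's for-loop over the customer keys with early 'return -1'
def CalcA_loop (store cust : PySem.Dict String Int) (items : List (String × Int)) (total : Int) : Int :=
  match items with
  | [] => total
  | (k, _) :: rest =>
    if store.contains k then
      CalcA_loop store cust rest (total + store.getD k 0 * cust.getD k 0)
    else -1

def Calculate_Bill (StoreList : List (String × Int)) (Customer_List : List (String × Int)) : Int :=
  CalcA_loop (PySem.Dict.ofList StoreList) (PySem.Dict.ofList Customer_List)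
    (PySem.Dict.ofList Customer_List).items 0

-- ===== PORT B =====
-- B's loop body: the pair ('total', 'needed') updated per store item (item, price)
def CalcB_step (cust : PySem.Dict String Int) (st : Int × PySem.Set String) (p : String × Int) : Int × PySem.Set String :=
  if PySem.Set.contains st.2 p.1 then
    (st.1 + p.2 * cust.getD p.1 0, PySem.Set.discard st.2 p.1)
  else st

def Calculate_Bill_alt (StoreList : List (String × Int)) (Customer_List : List (String × Int)) : Int :=
  let store := PySem.Dict.ofList StoreList
  let cust := PySem.Dict.ofList Customer_List
  let r := store.items.foldl (CalcB_step cust) (0, PySem.Set.ofList cust.keys)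
  if r.2.isEmpty then r.1 else -1

-- ===== PRECONDITION & SPEC =====
def Spec_Calculate_Bill (StoreList : List (String × Int)) (Customer_List : List (String × Int)) (out : Int) : Prop := out = Calculate_Bill_alt StoreList Customer_List
instance (StoreList : List (String × Int)) (Customer_List : List (String × Int)) (out : Int) : Decidable (Spec_Calculate_Bill StoreList Customer_List out) := by unfold Spec_Calculate_Bill; infer_instance

-- ===== CLAIM (what is proved, stated in full; the proofs are below) =====
def Claim_equal_Calculate_Bill : Prop := ∀ (StoreList : List (String × Int)) (Customer_List : List (String × Int)), Dom_Calculate_Bill StoreList Customer_List → Spec_Calculate_Bill StoreList Customer_List (Calculate_Bill StoreList Customer_List)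

-- ===== LEMMAS AND PROOFS =====

-- A's loop, characterised: early-exit -1 iff some key is missing, else the sum
theorem CalcA_loop_eq (store cust : PySem.Dict String Int)
    (items : List (String × Int)) (total : Int) :
    CalcA_loop store cust items total =
      if items.all (fun p => store.contains p.1) then
        total + (items.map (fun p => store.getD p.1 0 * cust.getD p.1 0)).sum
      else -1 := by
  induction items generalizing total with
  | nil => simp [CalcA_loop]
  | cons hd tl ih =>
    obtain ⟨k, v⟩ := hd
    simp only [CalcA_loop, List.all_cons, List.map_cons, List.sum_cons, Bool.and_eq_true]
    by_cases h : store.contains k = true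
    · rw [ih]
      simp only [h, true_and]
      by_cases h2 : (tl.all fun p => store.contains p.1) = true <;> simp [h2, add_assoc]
    · simp [h]

theorem contains_discard_of_ne (s : PySem.Set String) (k x : String) (hx : x ≠ k) :
    PySem.Set.contains (PySem.Set.discard s k) x = PySem.Set.contains s x := by
  rw [Bool.eq_iff_iff, PySem.Set.contains_iff, PySem.Set.contains_iff, PySem.Set.mem_discard]
  tauto

theorem diff_discard (s : PySem.Set String) (k : String) (ks : List String) :
    PySem.Set.diff (PySem.Set.discard s k) ks = PySem.Set.diff s (k :: ks) := by
  simp only [PySem.Set.diff, PySem.Set.discard, List.filter_filter]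
  apply List.filter_congr
  intro x _
  cases h : (x == k) with
  | true => simp [eq_of_beq h]
  | false => simp [beq_eq_false_iff_ne.mp h]

-- B's fold, characterised (the store items it runs over have distinct keys)
theorem foldB_eq (cust : PySem.Dict String Int) (l : List (String × Int))
    (hl : (l.map Prod.fst).Nodup) (t : Int) (s : PySem.Set String) :
    l.foldl (CalcB_step cust) (t, s) =
      (t + ((l.filter (fun p => PySem.Set.contains s p.1)).map
              (fun p => p.2 * cust.getD p.1 0)).sum,
       PySem.Set.diff s (l.map Prod.fst)) := by
  induction l generalizing t s with
  | nil => simp [PySem.Set.diff]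
  | cons hd tl ih =>
    obtain ⟨k, v⟩ := hd
    simp only [List.map_cons, List.nodup_cons] at hl
    obtain ⟨hk, htl⟩ := hl
    simp only [List.foldl_cons, CalcB_step, List.filter_cons]
    by_cases h : PySem.Set.contains s k = true
    · simp only [h, if_pos]
      rw [ih htl]
      have hfilter : tl.filter (fun p => PySem.Set.contains (PySem.Set.discard s k) p.1)
          = tl.filter (fun p => PySem.Set.contains s p.1) := by
        apply List.filter_congr
        intro p hp
        exact contains_discard_of_ne s k p.1 (fun hEq => hk (hEq ▸ List.mem_map_of_mem hp))
      rw [hfilter, diff_discard]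
      simp [add_assoc]
    · have hks : k ∉ s := fun hm => h (PySem.Set.contains_iff s k |>.mpr hm)
      simp only [h, if_neg, Bool.false_eq_true, not_false_iff]
      rw [ih htl]
      have hdiff : PySem.Set.diff s (tl.map Prod.fst) = PySem.Set.diff s (k :: tl.map Prod.fst) := by
        simp only [PySem.Set.diff]
        apply List.filter_congr
        intro x hx
        have hbe : (k == x) = false :=
          beq_eq_false_iff_ne.mpr (fun hEq => hks (by rw [hEq]; exact hx))
        simp
        intro _ hEq
        exact (beq_eq_false_iff_ne.mp hbe) hEq.symm
      simp [hdiff]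

-- the missing-key tests agree: 'every customer key is in the store' = 'needed ends empty'
theorem cond_eq (store cust : PySem.Dict String Int) :
    ((cust.items.all fun p => store.contains p.1) = true)
    ↔ ((PySem.Set.diff (PySem.Set.ofList cust.keys) (store.items.map Prod.fst)).isEmpty = true) := by
  simp [List.all_eq_true, PySem.Set.diff, List.isEmpty_iff, List.filter_eq_nil_iff,
        PySem.Set.mem_ofList, PySem.Dict.contains_iff_mem_keys, PySem.Dict.keys]

-- when no key is missing, A's customer-ordered sum equals B's store-ordered sum
theorem sum_eq (store cust : PySem.Dict String Int)
    (hs : store.keys.Nodup) (hc : cust.keys.Nodup)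
    (hall : ∀ p ∈ cust.items, p.1 ∈ store.keys) :
    (cust.items.map (fun p => store.getD p.1 0 * cust.getD p.1 0)).sum
    = ((store.items.filter (fun p => PySem.Set.contains (PySem.Set.ofList cust.keys) p.1)).map
        (fun p => p.2 * cust.getD p.1 0)).sum := by
  set g : String → Int := fun k => store.getD k 0 * cust.getD k 0 with hg
  set q : String → Bool := fun k => PySem.Set.contains (PySem.Set.ofList cust.keys) k with hq
  have hmap : (store.items.filter (fun p => q p.1)).map (fun p => p.2 * cust.getD p.1 0)
      = (store.items.filter (fun p => q p.1)).map (fun p => g p.1) := by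
    apply List.map_congr_left
    intro p hp
    have hpm : p ∈ store.items := List.mem_of_mem_filter hp
    obtain ⟨k, v⟩ := p
    have : store.getD k 0 = v := PySem.Dict.getD_of_mem_items store hpm hs 0
    simp [hg, this]
  rw [hmap]
  have hK1 : (store.items.filter (fun p => q p.1)).map (fun p => g p.1)
      = ((store.items.map Prod.fst).filter q).map g := by
    rw [List.filter_map, List.map_map]; rfl
  rw [hK1]
  have hK2 : cust.items.map (fun p => g p.1) = cust.keys.map g := by
    show _ = (cust.items.map (·.1)).map g
    rw [List.map_map]; rfl
  rw [hK2]
  have hperm : ((store.items.map Prod.fst).filter q).Perm cust.keys := by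
    apply (List.perm_ext_iff_of_nodup (hs.filter q) hc).mpr
    intro x
    simp only [List.mem_filter, hq, PySem.Set.contains_iff, PySem.Set.mem_ofList]
    constructor
    · rintro ⟨-, hx⟩; exact hx
    · intro hx
      refine ⟨?_, hx⟩
      obtain ⟨p, hp, rfl⟩ := List.mem_map.mp hx
      exact hall p hp
  exact ((hperm.map g).sum_eq).symm

-- the two programs, on abstract (Nodup-keyed) dicts
theorem bridge (store cust : PySem.Dict String Int)
    (hs : store.keys.Nodup) (hc : cust.keys.Nodup) :
    CalcA_loop store cust cust.items 0 =
      if (store.items.foldl (CalcB_step cust) (0, PySem.Set.ofList cust.keys)).2.isEmpty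
      then (store.items.foldl (CalcB_step cust) (0, PySem.Set.ofList cust.keys)).1
      else -1 := by
  rw [CalcA_loop_eq,
      foldB_eq cust store.items (show (store.items.map Prod.fst).Nodup from hs) 0
        (PySem.Set.ofList cust.keys)]
  by_cases hcond : (cust.items.all fun p => store.contains p.1) = true
  · have h2 := (cond_eq store cust).mp hcond
    have hall : ∀ p ∈ cust.items, p.1 ∈ store.keys := by
      simpa [List.all_eq_true, PySem.Dict.contains_iff_mem_keys] using hcond
    simp only [hcond, if_pos, h2]
    rw [sum_eq store cust hs hc hall]
  · have h2 : ¬ ((PySem.Set.diff (PySem.Set.ofList cust.keys) (store.items.map Prod.fst)).isEmpty = true) :=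
      fun h => hcond ((cond_eq store cust).mpr h)
    simp [hcond, h2]

-- ===== VERDICT (by name: the statement is the Claim_ definition above) =====
theorem Calculate_Bill_spec : Claim_equal_Calculate_Bill := by
  intro SL CL _
  exact bridge (PySem.Dict.ofList SL) (PySem.Dict.ofList CL)
    (PySem.Dict.nodup_keys_ofList SL) (PySem.Dict.nodup_keys_ofList CL)
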